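-- pv_equiv track=rewrite | github.com/TacosConChelas/LearningPython | CS50P/Chapter2/plates.py | valid_numbers
-- ===== SOURCE A (Python) =====
-- def valid_numbers(s):
--     numbers = "1234567890"
--     middle = int(len(s) / 2)
--     #1
--     for i in range(middle):
--         if s[i] in numbers:
--             return False
--     #2
--     number1 = ""
--     firstime = True
--     for character in s:
--         if character in numbers:
--             if firstime:
--                 number1 = character
--                 firstime = False
--     if number1 == "0":
--         return False
--     return True
-- ===== SOURCE B (Python) =====
-- def valid_numbers(s):
--     middle = int(len(s) / 2)
--     for i, c in enumerate(s):
--         if c in "1234567890":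
--             if i < middle:
--                 return False
--             return c != "0"
--     return True
-- ===== Notes on version B (the rewrite author's own statement) =====
-- stated objective: simpler
-- what changed: Replaced A's two sequential scans (an index loop over the first half, then a full pass maintaining number1/firstime flags to capture the first digit) with one early-exiting enumerate pass that decides everything at the first digit found.
import Mathlib
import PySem

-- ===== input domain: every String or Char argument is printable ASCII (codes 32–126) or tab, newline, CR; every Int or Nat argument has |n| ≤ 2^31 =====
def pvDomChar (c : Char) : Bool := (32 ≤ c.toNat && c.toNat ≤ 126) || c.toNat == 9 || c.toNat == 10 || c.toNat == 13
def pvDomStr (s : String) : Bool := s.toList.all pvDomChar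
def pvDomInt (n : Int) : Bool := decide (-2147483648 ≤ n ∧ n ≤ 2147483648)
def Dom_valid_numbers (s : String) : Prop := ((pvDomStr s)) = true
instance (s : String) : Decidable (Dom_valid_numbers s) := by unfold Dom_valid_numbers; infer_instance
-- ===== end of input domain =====

-- B fuses A's two sequential scans into a single early-exiting pass over (index, char); return value only, same result.

-- ===== PORT A =====
def vnDigits : List Char := "1234567890".toList

-- "for i in range(middle): if s[i] in numbers: return False" — scans the first `m` characters in index order
def vnLoop1 : List Char → Nat → Bool
  | _, 0 => false
  | [], _ + 1 => false
  | c :: rest, m + 1 => if c ∈ vnDigits then true else vnLoop1 rest m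

-- the second loop: number1/firstime state, returns the final number1
def vnLoop2 : List Char → String → Bool → String
  | [], number1, _ => number1
  | c :: rest, number1, firstime =>
      if c ∈ vnDigits then
        if firstime then vnLoop2 rest (String.ofList [c]) false
        else vnLoop2 rest number1 firstime
      else vnLoop2 rest number1 firstime

def valid_numbers (s : String) : Bool :=
  let middle := s.toList.length / 2
  if vnLoop1 s.toList middle then false
  else
    let number1 := vnLoop2 s.toList "" true
    if number1 = "0" then false else true

-- ===== PORT B =====
-- the enumerate loop of Source B: i is the current index, m the midpoint
def vnAltLoop (m : Nat) : Nat → List Char → Bool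
  | _, [] => true
  | i, c :: rest =>
      if c ∈ vnDigits then
        if i < m then false else decide (c ≠ '0')
      else vnAltLoop m (i + 1) rest

def valid_numbers_alt (s : String) : Bool :=
  let middle := s.toList.length / 2
  vnAltLoop middle 0 s.toList

-- ===== PRECONDITION & SPEC =====
def Spec_valid_numbers (s : String) (out : Bool) : Prop := out = valid_numbers_alt s
instance (s : String) (out : Bool) : Decidable (Spec_valid_numbers s out) := by unfold Spec_valid_numbers; infer_instance

-- ===== CLAIM (what is proved, stated in full; the proofs are below) =====
def Claim_equal_valid_numbers : Prop := ∀ (s : String), Dom_valid_numbers s → Spec_valid_numbers s (valid_numbers s)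

-- ===== LEMMAS AND PROOFS =====

-- ===== VERDICT (by name: the statement is the Claim_ definition above) =====
lemma vnLoop1_eq_take_any (cs : List Char) (m : Nat) :
    vnLoop1 cs m = (cs.take m).any (· ∈ vnDigits) := by
  induction cs generalizing m with
  | nil => cases m <;> simp [vnLoop1]
  | cons c rest ih =>
      cases m with
      | zero => simp [vnLoop1]
      | succ k =>
          simp only [vnLoop1, List.take_succ_cons, List.any_cons]
          split <;> simp_all

lemma vnLoop2_eq_find (cs : List Char) :
    vnLoop2 cs "" true =
      match cs.find? (· ∈ vnDigits) with
      | some c => String.ofList [c]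
      | none => "" := by
  have aux : ∀ cs (n1 : String), vnLoop2 cs n1 false = n1 := by
    intro cs; induction cs with
    | nil => intro n1; simp [vnLoop2]
    | cons c rest ih => intro n1; simp only [vnLoop2]; split <;> simp [ih]
  induction cs with
  | nil => simp [vnLoop2]
  | cons c rest ih =>
      simp only [vnLoop2, List.find?]
      by_cases h : c ∈ vnDigits <;> simp [h, aux, ih]

lemma vnAltLoop_eq (m : Nat) (cs : List Char) : ∀ i,
    vnAltLoop m i cs =
      (if (cs.take (m - i)).any (· ∈ vnDigits) then false
       else match cs.find? (· ∈ vnDigits) with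
            | some c => decide (c ≠ '0')
            | none => true) := by
  induction cs with
  | nil => intro i; simp [vnAltLoop]
  | cons c rest ih =>
      intro i
      simp only [vnAltLoop]
      by_cases h : c ∈ vnDigits
      · simp only [h, if_pos]
        by_cases him : i < m
        · have : m - i = (m - i - 1) + 1 := by omega
          rw [this]
          simp [h, him]
        · have : m - i = 0 := by omega
          rw [this]
          simp [h, him, List.find?]
      · have hmi : m - i = (m - (i + 1)) + 1 ∨ m - i = 0 ∧ m - (i + 1) = 0 := by omega
        simp only [h, if_neg, if_false, ih (i + 1)]
        rcases hmi with h1 | ⟨h1, h2⟩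
        · rw [h1]
          simp [h, List.find?]
        · rw [h1, h2]
          simp [h, List.find?]

lemma mk_single_eq_zero (c : Char) : (String.ofList [c] = "0") ↔ c = '0' := by
  constructor
  · intro h
    have : (String.ofList [c]).toList = ("0" : String).toList := by rw [h]
    simpa using this
  · rintro rfl; rfl

theorem valid_numbers_spec : Claim_equal_valid_numbers := by
  intro s _
  unfold Spec_valid_numbers valid_numbers valid_numbers_alt
  simp only [vnAltLoop_eq, vnLoop1_eq_take_any, vnLoop2_eq_find, Nat.sub_zero]
  split
  · rfl
  · cases h : s.toList.find? (· ∈ vnDigits) with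
    | none => simp [h]
    | some c =>
        simp only [h]
        by_cases hc : c = '0' <;> simp [hc, mk_single_eq_zero]
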